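-- pv_equiv track=rewrite | github.com/330sum/Algorithm | 프로그래머스/unrated/181887. 홀수 vs 짝수/홀수 vs 짝수.py | solution
-- ===== SOURCE A (Python) =====
-- def solution(num_list):
--     even_sum = 0
--     odd_sum = 0
--     for i in range(len(num_list)):
--         if i % 2 == 0:
--             even_sum += int(num_list[i])
--         else:
--             odd_sum += int(num_list[i])
--
--     if even_sum < odd_sum:
--         return odd_sum
--     else:
--         return even_sum
-- ===== SOURCE B (Python) =====
-- def solution(num_list):
--     total = 0
--     diff = 0
--     sign = 1
--     for x in num_list:
--         v = int(x)
--         total += v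
--         diff += sign * v
--         sign = -sign
--     return (total + abs(diff)) // 2
-- ===== Notes on version B (the rewrite author's own statement) =====
-- stated objective: alternative
-- what changed: Instead of keeping two parity-indexed accumulators and comparing them, B accumulates the total sum and the alternating (signed) sum in one pass and recovers the larger parity sum arithmetically as (total + abs(diff)) // 2, eliminating the branch and the comparison.
import Mathlib
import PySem

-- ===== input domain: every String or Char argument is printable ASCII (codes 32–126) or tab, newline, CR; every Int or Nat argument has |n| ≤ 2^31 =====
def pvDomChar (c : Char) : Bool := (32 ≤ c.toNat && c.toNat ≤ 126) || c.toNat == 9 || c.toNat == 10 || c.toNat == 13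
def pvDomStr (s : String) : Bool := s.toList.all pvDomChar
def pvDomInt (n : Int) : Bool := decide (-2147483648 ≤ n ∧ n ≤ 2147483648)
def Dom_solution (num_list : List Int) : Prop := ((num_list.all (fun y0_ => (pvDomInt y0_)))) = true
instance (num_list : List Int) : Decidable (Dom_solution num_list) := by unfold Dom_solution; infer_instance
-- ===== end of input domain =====

-- B replaces the two parity accumulators and the final comparison by one pass computing the
-- total and the alternating sum, recovering the answer as (total + |diff|) // 2 (alternative shape, same cost).

-- ===== PORT A =====
-- literal port of A: indexed loop over range(len), parity test on the index, final >= comparison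
def solution (num_list : List Int) : Int :=
  let r := (PySem.List.pyRange 0 (PySem.List.len num_list) 1).foldl
    (fun (s : Int × Int) i =>
      if PySem.Int.mod i 2 == 0 then (s.1 + PySem.List.pyGetD num_list i 0, s.2)
      else (s.1, s.2 + PySem.List.pyGetD num_list i 0))
    (0, 0)
  if r.1 < r.2 then r.2 else r.1

-- ===== PORT B =====
-- Source B's loop: state (total, diff, sign); then (total + abs(diff)) // 2
def solution_alt (num_list : List Int) : Int :=
  let r := num_list.foldl
    (fun (s : Int × Int × Int) x => (s.1 + x, s.2.1 + s.2.2 * x, -s.2.2))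
    (0, 0, 1)
  PySem.Int.floordiv (r.1 + |r.2.1|) 2

-- ===== PRECONDITION & SPEC =====
def Spec_solution (num_list : List Int) (out : Int) : Prop := out = solution_alt num_list
instance (num_list : List Int) (out : Int) : Decidable (Spec_solution num_list out) := by unfold Spec_solution; infer_instance

-- ===== CLAIM (what is proved, stated in full; the proofs are below) =====
def Claim_equal_solution : Prop := ∀ (num_list : List Int), Dom_solution num_list → Spec_solution num_list (solution num_list)

-- ===== LEMMAS AND PROOFS =====

-- proof helper: the (even-position sum, odd-position sum) pair, two elements at a time
def pvPair : List Int → Int → Int → Int × Int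
  | [], e, o => (e, o)
  | [x], e, o => (e + x, o)
  | x :: y :: t, e, o => pvPair t (e + x) (o + y)

-- A's loop body, seen over (index, element) pairs
def pvBodyA (s : Int × Int) (p : Int × Int) : Int × Int :=
  if PySem.Int.mod p.1 2 == 0 then (s.1 + p.2, s.2) else (s.1, s.2 + p.2)

-- A's fold over enumerate, started at an even index, computes pvPair
theorem pv_mainA : ∀ (xs : List Int) (s : Nat) (a b : Int),
    (PySem.List.enumerate xs ((2 * s : Nat) : Int)).foldl pvBodyA (a, b) = pvPair xs a b
  | [], s, a, b => by simp [PySem.List.enumerate_nil, pvPair]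
  | [x], s, a, b => by
      simp [PySem.List.enumerate_cons, PySem.List.enumerate_nil, pvPair, pvBodyA]
  | x :: y :: t, s, a, b => by
      have h2 : ((2 * s : Nat) : Int) + 1 + 1 = ((2 * (s + 1) : Nat) : Int) := by push_cast; ring
      rw [PySem.List.enumerate_cons, PySem.List.enumerate_cons, h2]
      simp only [List.foldl_cons]
      rw [show pvBodyA (a, b) (((2 * s : Nat) : Int), x) = (a + x, b) by simp [pvBodyA]]
      rw [show pvBodyA (a + x, b) (((2 * s : Nat) : Int) + 1, y) = (a + x, b + y) by simp [pvBodyA]]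
      exact pv_mainA t (s + 1) (a + x) (b + y)

-- pvPair accumulator linearity
theorem pvPair_acc : ∀ (l : List Int) (a b : Int),
    pvPair l a b = (a + (pvPair l 0 0).1, b + (pvPair l 0 0).2)
  | [], a, b => by simp [pvPair]
  | [x], a, b => by simp [pvPair]
  | x :: y :: tl, a, b => by
      simp only [pvPair]
      rw [pvPair_acc tl (a + x) (b + y), pvPair_acc tl (0 + x) (0 + y)]
      refine Prod.ext ?_ ?_ <;> simp <;> ring

-- B's fold body
def pvBodyB (s : Int × Int × Int) (x : Int) : Int × Int × Int :=
  (s.1 + x, s.2.1 + s.2.2 * x, -s.2.2)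

-- B's fold, entered with sign +1, tracks e + o and e - o of pvPair
theorem pv_mainB : ∀ (xs : List Int) (t d : Int),
    xs.foldl pvBodyB (t, d, 1)
      = (t + (pvPair xs 0 0).1 + (pvPair xs 0 0).2,
         d + (pvPair xs 0 0).1 - (pvPair xs 0 0).2,
         (xs.foldl pvBodyB (t, d, 1)).2.2)
  | [], t, d => by simp [pvPair]
  | [x], t, d => by simp [pvPair, pvBodyB]
  | x :: y :: r, t, d => by
      have step : (x :: y :: r).foldl pvBodyB (t, d, 1)
          = r.foldl pvBodyB (t + x + y, d + x - y, 1) := by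
        simp [pvBodyB]; ring_nf
      rw [step, pv_mainB r (t + x + y) (d + x - y)]
      simp only [pvPair]
      rw [pvPair_acc r (0 + x) (0 + y)]
      refine Prod.ext ?_ (Prod.ext ?_ ?_)
      · simp; ring
      · simp; ring
      · simp

-- ===== VERDICT (by name: the statement is the Claim_ definition above) =====
theorem solution_spec : Claim_equal_solution := by
  intro num_list _
  unfold Spec_solution solution solution_alt
  have he : (PySem.List.pyRange 0 (PySem.List.len num_list) 1).foldl
      (fun (s : Int × Int) i =>
        if PySem.Int.mod i 2 == 0 then (s.1 + PySem.List.pyGetD num_list i 0, s.2)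
        else (s.1, s.2 + PySem.List.pyGetD num_list i 0)) (0, 0)
      = (PySem.List.enumerate num_list 0).foldl pvBodyA (0, 0) := by
    rw [PySem.List.enumerate_eq_map_pyRange (d := 0), List.foldl_map]
    rfl
  have hA : (PySem.List.enumerate num_list 0).foldl pvBodyA (0, 0) = pvPair num_list 0 0 := by
    simpa using pv_mainA num_list 0 0 0
  have hB := pv_mainB num_list 0 0
  rw [he, hA]
  rcases hp : pvPair num_list 0 0 with ⟨e, o⟩
  rw [hp] at hB
  simp only at hB ⊢
  have h1 : (num_list.foldl pvBodyB (0, 0, 1)).1 = e + o := by rw [hB]; ring_nf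
  have h2 : (num_list.foldl pvBodyB (0, 0, 1)).2.1 = e - o := by rw [hB]; ring_nf
  show (if e < o then o else e)
      = PySem.Int.floordiv ((num_list.foldl (fun (s : Int × Int × Int) x =>
          (s.1 + x, s.2.1 + s.2.2 * x, -s.2.2)) (0, 0, 1)).1
        + |(num_list.foldl (fun (s : Int × Int × Int) x =>
          (s.1 + x, s.2.1 + s.2.2 * x, -s.2.2)) (0, 0, 1)).2.1|) 2
  have hfold : num_list.foldl (fun (s : Int × Int × Int) x =>
      (s.1 + x, s.2.1 + s.2.2 * x, -s.2.2)) (0, 0, 1) = num_list.foldl pvBodyB (0, 0, 1) := rfl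
  rw [hfold, h1, h2, PySem.Int.floordiv_eq_ediv_of_pos (by norm_num)]
  rcases lt_or_ge e o with h | h
  · rw [if_pos h, abs_of_nonpos (by omega)]; omega
  · rw [if_neg (not_lt.mpr h), abs_of_nonneg (by omega)]; omega
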